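-- pv_equiv track=rewrite | github.com/deryann/pyExamDB | PyQuestionEditer/HDYLatexParser.py | transformAnsAsNum
-- ===== SOURCE A (Python) =====
-- def transformAnsAsNum(strInput):
--     dicReplaceAns= {u"(A)":u"(1)",
--                     u"(B)":u"(2)",
--                     u"(C)":u"(3)",
--                     u"(D)":u"(4)",
--                     u"(E)":u"(5)"}
--     for item in dicReplaceAns.keys():
--         strInput = strInput.replace(item, dicReplaceAns[item])
--     return strInput
-- ===== SOURCE B (Python) =====
-- def transformAnsAsNum(strInput):
--     # single left-to-right scan instead of five full replace passes
--     mapping = {u"A": u"1", u"B": u"2", u"C": u"3", u"D": u"4", u"E": u"5"}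
--     out = []
--     i = 0
--     n = len(strInput)
--     while i < n:
--         if (strInput[i] == u"(" and i + 2 < n and strInput[i + 2] == u")"
--                 and strInput[i + 1] in mapping):
--             out.append(u"(" + mapping[strInput[i + 1]] + u")")
--             i += 3
--         else:
--             out.append(strInput[i])
--             i += 1
--     return u"".join(out)
-- ===== Notes on version B (the rewrite author's own statement) =====
-- stated objective: alternative
-- what changed: A runs five separate full-string replace passes (one per label); B rewrites the string in a single left-to-right scan that checks each 3-char window against the fixed letter-to-digit mapping.
import Mathlib
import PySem

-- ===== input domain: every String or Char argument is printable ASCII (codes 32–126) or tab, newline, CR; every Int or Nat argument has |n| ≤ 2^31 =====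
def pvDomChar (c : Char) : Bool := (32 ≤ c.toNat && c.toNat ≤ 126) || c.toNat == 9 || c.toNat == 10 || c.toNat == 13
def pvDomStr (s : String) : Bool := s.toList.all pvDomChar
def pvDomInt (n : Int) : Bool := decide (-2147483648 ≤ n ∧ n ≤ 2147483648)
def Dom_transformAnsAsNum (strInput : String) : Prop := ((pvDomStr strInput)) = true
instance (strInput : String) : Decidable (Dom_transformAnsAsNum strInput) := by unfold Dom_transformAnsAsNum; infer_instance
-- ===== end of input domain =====

-- B replaces A's five full-string replace passes by one left-to-right scan; objective: alternative (same cost class, one pass).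

-- ===== PORT A =====
def transformAnsAsNum (strInput : String) : String :=
  let dicReplaceAns : PySem.Dict String String :=
    ((((PySem.Dict.empty.insert "(A)" "(1)").insert "(B)" "(2)").insert "(C)" "(3)").insert
        "(D)" "(4)").insert "(E)" "(5)"
  -- for item in dicReplaceAns.keys(): strInput = strInput.replace(item, dicReplaceAns[item])
  -- (dicReplaceAns[item] cannot miss: item ranges over the dict's own keys, so getD's default is dead)
  (dicReplaceAns.keys).foldl
    (fun s item => PySem.Str.replace s item ((dicReplaceAns.get? item).getD "")) strInput

-- ===== PORT B =====
-- mapping = {'A':'1','B':'2','C':'3','D':'4','E':'5'}; value lookup 'strInput[i+1] in mapping'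
def pvDigitOf? (c : Char) : Option Char :=
  if c = 'A' then some '1' else if c = 'B' then some '2' else if c = 'C' then some '3'
  else if c = 'D' then some '4' else if c = 'E' then some '5' else none

-- the while-loop of Source B: window test strInput[i]='(' ∧ strInput[i+2]=')' ∧ strInput[i+1] in mapping,
-- emitting the translated 3-char token (advance 3) or the single char (advance 1)
def pvScan : List Char → List Char
  | '(' :: y :: ')' :: t =>
    match pvDigitOf? y with
    | some d => '(' :: d :: ')' :: pvScan t
    | none => '(' :: pvScan (y :: ')' :: t)
  | c :: t => c :: pvScan t
  | [] => []

def transformAnsAsNum_alt (strInput : String) : String := String.ofList (pvScan strInput.toList)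

-- ===== PRECONDITION & SPEC =====
def Spec_transformAnsAsNum (strInput : String) (out : String) : Prop := out = transformAnsAsNum_alt strInput
instance (strInput : String) (out : String) : Decidable (Spec_transformAnsAsNum strInput out) := by unfold Spec_transformAnsAsNum; infer_instance

-- ===== CLAIM (what is proved, stated in full; the proofs are below) =====
def Claim_equal_transformAnsAsNum : Prop := ∀ (strInput : String), Dom_transformAnsAsNum strInput → Spec_transformAnsAsNum strInput (transformAnsAsNum strInput)

-- ===== LEMMAS AND PROOFS =====

-- Python's s.replace("(x)","(d)") as the natural structural recursion (proof-side model of A's passes)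
def pvRep (x d : Char) : List Char → List Char
  | '(' :: y :: ')' :: t => if y = x then '(' :: d :: ')' :: pvRep x d t
                            else '(' :: pvRep x d (y :: ')' :: t)
  | c :: t => c :: pvRep x d t
  | [] => []

lemma pvSingleton_prefix (c : Char) (L : List Char) : [c] <+: L ↔ L.head? = some c := by
  cases L with
  | nil => simp
  | cons a t => simp [List.cons_prefix_cons, eq_comm]

lemma pvRep_key (x d : Char) (t : List Char) :
    pvRep x d ('(' :: x :: ')' :: t) = '(' :: d :: ')' :: pvRep x d t := by
  simp [pvRep]

lemma pvRep_cons (x d c : Char) (t : List Char) (h : ¬ ['(', x, ')'] <+: c :: t) :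
    pvRep x d (c :: t) = c :: pvRep x d t := by
  rcases t with _ | ⟨c2, _ | ⟨c3, t3⟩⟩
  · simp [pvRep]
  · simp [pvRep]
  · by_cases h1 : c = '('
    · by_cases h3 : c3 = ')'
      · subst h1 h3
        by_cases h2 : c2 = x
        · exact absurd (by simp [h2, List.cons_prefix_cons]) h
        · simp [pvRep, h2]
      · simp [pvRep, h1, h3]
    · simp [pvRep, h1]

lemma pvRep_head? (x d : Char) (l : List Char) : (pvRep x d l).head? = l.head? := by
  rcases l with _ | ⟨c, _ | ⟨c2, _ | ⟨c3, t3⟩⟩⟩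
  · simp [pvRep]
  · simp [pvRep]
  · simp [pvRep]
  · by_cases h1 : c = '('
    · by_cases h3 : c3 = ')'
      · subst h1 h3
        by_cases h2 : c2 = x <;> simp [pvRep, h2]
      · simp [pvRep, h1, h3]
    · simp [pvRep, h1]

lemma pvRep_keyPrefix (x d y c : Char) (t : List Char) (hy : y ≠ '(') :
    ['(', y, ')'] <+: c :: pvRep x d t ↔ ['(', y, ')'] <+: c :: t := by
  simp only [List.cons_prefix_cons]
  refine and_congr_right fun _ => ?_
  cases t with
  | nil => simp [pvRep]
  | cons a t1 =>
    by_cases ha : a = y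
    · subst ha
      have hstep : pvRep x d (a :: t1) = a :: pvRep x d t1 := by
        refine pvRep_cons x d a t1 ?_
        intro hpre
        rw [List.cons_prefix_cons] at hpre
        exact hy hpre.1.symm
      rw [hstep]
      simp [List.cons_prefix_cons, pvSingleton_prefix, pvRep_head?]
    · constructor
      · intro hpre
        exfalso
        obtain ⟨r, hr⟩ := hpre
        have h := pvRep_head? x d (a :: t1)
        rw [← hr] at h
        simp at h
        exact ha h.symm
      · intro hpre
        exfalso
        obtain ⟨r, hr⟩ := hpre
        exact ha (List.cons_eq_cons.mp hr).1.symm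

lemma pvChain_eq_scan : ∀ n l, l.length ≤ n →
    pvRep 'E' '5' (pvRep 'D' '4' (pvRep 'C' '3' (pvRep 'B' '2' (pvRep 'A' '1' l)))) = pvScan l := by
  intro n
  induction n with
  | zero =>
    intro l hl
    have : l = [] := List.eq_nil_of_length_eq_zero (Nat.le_zero.mp hl)
    subst this; rfl
  | succ n ih =>
    intro l hl
    rcases l with _ | ⟨c, s⟩
    · rfl
    · by_cases hkey : c = '(' ∧ ∃ y d t3, s = y :: ')' :: t3 ∧ pvDigitOf? y = some d
      · obtain ⟨hc, y, d, t3, hs, hyd⟩ := hkey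
        subst hc hs
        -- y is one of A..E with digit d; unfold pvDigitOf?
        have hy : (y = 'A' ∧ d = '1') ∨ (y = 'B' ∧ d = '2') ∨ (y = 'C' ∧ d = '3') ∨
            (y = 'D' ∧ d = '4') ∨ (y = 'E' ∧ d = '5') := by
          unfold pvDigitOf? at hyd
          split_ifs at hyd with h1 h2 h3 h4 h5
          · exact Or.inl ⟨h1, (Option.some_inj.mp hyd).symm⟩
          · exact Or.inr (Or.inl ⟨h2, (Option.some_inj.mp hyd).symm⟩)
          · exact Or.inr (Or.inr (Or.inl ⟨h3, (Option.some_inj.mp hyd).symm⟩))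
          · exact Or.inr (Or.inr (Or.inr (Or.inl ⟨h4, (Option.some_inj.mp hyd).symm⟩)))
          · exact Or.inr (Or.inr (Or.inr (Or.inr ⟨h5, (Option.some_inj.mp hyd).symm⟩)))
        have ht3 : t3.length ≤ n := by simp at hl; omega
        have IH := ih t3 ht3
        have pass : ∀ (x xd z : Char), z ≠ x → z ≠ '(' → ∀ u,
            pvRep x xd ('(' :: z :: ')' :: u) = '(' :: z :: ')' :: pvRep x xd u := by
          intro x xd z hzx hzp u
          have np1 : ¬ ['(', x, ')'] <+: '(' :: z :: ')' :: u := by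
            intro h
            rw [List.cons_prefix_cons, List.cons_prefix_cons] at h
            exact hzx h.2.1.symm
          have np2 : ¬ ['(', x, ')'] <+: z :: ')' :: u := by
            intro h
            rw [List.cons_prefix_cons] at h
            exact hzp h.1.symm
          have np3 : ¬ ['(', x, ')'] <+: ')' :: u := by
            intro h
            rw [List.cons_prefix_cons] at h
            exact absurd h.1 (by decide)
          rw [pvRep_cons _ _ _ _ np1, pvRep_cons _ _ _ _ np2, pvRep_cons _ _ _ _ np3]
        rcases hy with ⟨hy, hd⟩ | ⟨hy, hd⟩ | ⟨hy, hd⟩ | ⟨hy, hd⟩ | ⟨hy, hd⟩ <;> subst hy <;> subst hd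
        · rw [pvRep_key, pass 'B' '2' '1' (by decide) (by decide), pass 'C' '3' '1' (by decide) (by decide),
            pass 'D' '4' '1' (by decide) (by decide), pass 'E' '5' '1' (by decide) (by decide), IH]
          simp [pvScan, pvDigitOf?]
        · rw [pass 'A' '1' 'B' (by decide) (by decide), pvRep_key, pass 'C' '3' '2' (by decide) (by decide),
            pass 'D' '4' '2' (by decide) (by decide), pass 'E' '5' '2' (by decide) (by decide), IH]
          simp [pvScan, pvDigitOf?]
        · rw [pass 'A' '1' 'C' (by decide) (by decide), pass 'B' '2' 'C' (by decide) (by decide), pvRep_key,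
            pass 'D' '4' '3' (by decide) (by decide), pass 'E' '5' '3' (by decide) (by decide), IH]
          simp [pvScan, pvDigitOf?]
        · rw [pass 'A' '1' 'D' (by decide) (by decide), pass 'B' '2' 'D' (by decide) (by decide),
            pass 'C' '3' 'D' (by decide) (by decide), pvRep_key, pass 'E' '5' '4' (by decide) (by decide), IH]
          simp [pvScan, pvDigitOf?]
        · rw [pass 'A' '1' 'E' (by decide) (by decide), pass 'B' '2' 'E' (by decide) (by decide),
            pass 'C' '3' 'E' (by decide) (by decide), pass 'D' '4' 'E' (by decide) (by decide), pvRep_key, IH]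
          simp [pvScan, pvDigitOf?]
      · -- no translated token at the head: every pass and the scan step one char
        have hs' : s.length ≤ n := by simp at hl; omega
        have IH := ih s hs'
        have hnp : ∀ y : Char, pvDigitOf? y ≠ none → ¬ ['(', y, ')'] <+: c :: s := by
          intro y hyd hpre
          rcases s with _ | ⟨c2, _ | ⟨c3, t3⟩⟩
          · simp [List.cons_prefix_cons] at hpre
          · simp [List.cons_prefix_cons] at hpre
          · rw [List.cons_prefix_cons, List.cons_prefix_cons, List.cons_prefix_cons] at hpre
            obtain ⟨h1, h2, h3, -⟩ := hpre
            obtain ⟨d, hd⟩ := Option.ne_none_iff_exists'.mp hyd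
            exact hkey ⟨h1.symm, c2, d, t3, by rw [← h3], h2 ▸ hd⟩
        have step : ∀ (x xd : Char), pvDigitOf? x ≠ none → ∀ u,
            (['(', x, ')'] <+: c :: u ↔ ['(', x, ')'] <+: c :: s) →
            pvRep x xd (c :: u) = c :: pvRep x xd u := by
          intro x xd hx u hiff
          exact pvRep_cons x xd c u (fun hpre => hnp x hx (hiff.mp hpre))
        rw [step 'A' '1' (by decide) s Iff.rfl]
        rw [step 'B' '2' (by decide) _ (pvRep_keyPrefix _ _ _ _ _ (by decide))]
        rw [step 'C' '3' (by decide) _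
          ((pvRep_keyPrefix _ _ _ _ _ (by decide)).trans (pvRep_keyPrefix _ _ _ _ _ (by decide)))]
        rw [step 'D' '4' (by decide) _
          (((pvRep_keyPrefix _ _ _ _ _ (by decide)).trans (pvRep_keyPrefix _ _ _ _ _ (by decide))).trans
            (pvRep_keyPrefix _ _ _ _ _ (by decide)))]
        rw [step 'E' '5' (by decide) _
          ((((pvRep_keyPrefix _ _ _ _ _ (by decide)).trans (pvRep_keyPrefix _ _ _ _ _ (by decide))).trans
            (pvRep_keyPrefix _ _ _ _ _ (by decide))).trans (pvRep_keyPrefix _ _ _ _ _ (by decide)))]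
        rw [IH]
        -- pvScan (c :: s) = c :: pvScan s in this case
        rcases s with _ | ⟨c2, _ | ⟨c3, t3⟩⟩
        · simp [pvScan]
        · simp [pvScan]
        · by_cases h1 : c = '('
          · by_cases h3 : c3 = ')'
            · subst h1 h3
              have hd2 : pvDigitOf? c2 = none := by
                by_contra hne
                exact hkey ⟨rfl, c2, _, t3, rfl, (Option.ne_none_iff_exists'.mp hne).choose_spec⟩
              simp [pvScan, hd2]
            · simp [pvScan, h1, h3]
          · simp [pvScan, h1]

lemma pvGo_eq (x d : Char) : ∀ (fuel : Nat) (l acc : List Char), l.length ≤ fuel →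
    PySem.Chars.replace.go ['(', x, ')'] ['(', d, ')'] fuel l acc = acc.reverse ++ pvRep x d l := by
  intro fuel
  induction fuel with
  | zero =>
    intro l acc hl
    have : l = [] := List.eq_nil_of_length_eq_zero (Nat.le_zero.mp hl)
    subst this
    simp [PySem.Chars.replace.go, pvRep]
  | succ n ih =>
    intro l acc hl
    cases l with
    | nil => simp [PySem.Chars.replace.go, pvRep]
    | cons c t =>
      rw [PySem.Chars.replace.go]
      by_cases hpre : ['(', x, ')'].isPrefixOf (c :: t) = true
      · rw [if_pos hpre]
        have hp : ['(', x, ')'] <+: c :: t := List.isPrefixOf_iff_prefix.mp hpre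
        obtain ⟨r, hr⟩ := hp
        have hct : c :: t = '(' :: x :: ')' :: r := by rw [← hr]; rfl
        rw [hct]
        have hlen : r.length ≤ n := by
          have := congrArg List.length hct
          simp at this
          simp at hl
          omega
        have hdrop : List.drop (['(', x, ')'].length) ('(' :: x :: ')' :: r) = r := by rfl
        rw [hdrop, ih r _ hlen, pvRep_key]
        simp
      · rw [if_neg hpre]
        have hlen : t.length ≤ n := by simp at hl; omega
        rw [ih t _ hlen, pvRep_cons x d c t (fun hp => hpre (List.isPrefixOf_iff_prefix.mpr hp))]
        simp

lemma pvReplace_eq (x d : Char) (s : List Char) :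
    PySem.Chars.replace s ['(', x, ')'] ['(', d, ')'] = pvRep x d s := by
  rw [PySem.Chars.replace]
  rw [if_neg (by simp)]
  exact pvGo_eq x d s.length s [] le_rfl

lemma pvA_unfold (s : String) :
    transformAnsAsNum s =
      PySem.Str.replace (PySem.Str.replace (PySem.Str.replace (PySem.Str.replace
        (PySem.Str.replace s "(A)" "(1)") "(B)" "(2)") "(C)" "(3)") "(D)" "(4)") "(E)" "(5)" := rfl

-- ===== VERDICT (by name: the statement is the Claim_ definition above) =====
theorem transformAnsAsNum_spec : Claim_equal_transformAnsAsNum := by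
  intro s _
  unfold Spec_transformAnsAsNum transformAnsAsNum_alt
  rw [pvA_unfold]
  apply String.toList_inj.mp
  simp only [PySem.Str.toList_replace, String.toList_ofList]
  show PySem.Chars.replace (PySem.Chars.replace (PySem.Chars.replace (PySem.Chars.replace
      (PySem.Chars.replace s.toList "(A)".toList "(1)".toList) "(B)".toList "(2)".toList)
      "(C)".toList "(3)".toList) "(D)".toList "(4)".toList) "(E)".toList "(5)".toList
    = pvScan s.toList
  simp only [show "(A)".toList = ['(', 'A', ')'] from rfl, show "(1)".toList = ['(', '1', ')'] from rfl,
    show "(B)".toList = ['(', 'B', ')'] from rfl, show "(2)".toList = ['(', '2', ')'] from rfl,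
    show "(C)".toList = ['(', 'C', ')'] from rfl, show "(3)".toList = ['(', '3', ')'] from rfl,
    show "(D)".toList = ['(', 'D', ')'] from rfl, show "(4)".toList = ['(', '4', ')'] from rfl,
    show "(E)".toList = ['(', 'E', ')'] from rfl, show "(5)".toList = ['(', '5', ')'] from rfl,
    pvReplace_eq]
  exact pvChain_eq_scan s.toList.length s.toList le_rfl
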